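-- pv_equiv track=rewrite | github.com/RobertoCampisi/advent-of-code | 2023/day13.py | find_reflect
-- ===== SOURCE A (Python) =====
-- def find_reflect(arr):
--     prev = -1
--     for i,n in enumerate(arr):
--         if n == prev:
--             j = 1
--             while 0 <= i - j and i + j - 1 < len(arr):
--                 if arr[i - j] != arr[i + j - 1]:
--                     break
--                 j += 1
--             if i - j < 0 or i + j - 1 == len(arr):
--                 return i+1
--         prev = n
--     return -1
-- ===== SOURCE B (Python) =====
-- def find_reflect(arr):
--     n = len(arr)
--     rev = arr[::-1]
--     for i in range(1, n):
--         if arr[i] != arr[i - 1]: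
--             continue
--         k = min(i, n - i)
--         if rev[n - i:n - i + k] == arr[i:i + k]:
--             return i + 1
--     return -1
-- ===== Notes on version B (the rewrite author's own statement) =====
-- stated objective: alternative
-- what changed: A's sentinel-prev scan with a hand-rolled inner while loop is replaced by precomputing the reversed list once and, at each neighbor-equal axis, comparing a contiguous slice of the reversed list against the suffix slice; this trades A's per-element Python loop for bulk slice comparisons.
-- intended difference: On inputs whose first element is -1, A's 'prev = -1' sentinel fires at i=0 and A returns 1 (a reflection axis before the first row, meaningless); B returns the first real reflection axis or -1, which is the intended value. — e.g. on find_reflect([-1]): A returns 1, B returns -1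
import Mathlib
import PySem

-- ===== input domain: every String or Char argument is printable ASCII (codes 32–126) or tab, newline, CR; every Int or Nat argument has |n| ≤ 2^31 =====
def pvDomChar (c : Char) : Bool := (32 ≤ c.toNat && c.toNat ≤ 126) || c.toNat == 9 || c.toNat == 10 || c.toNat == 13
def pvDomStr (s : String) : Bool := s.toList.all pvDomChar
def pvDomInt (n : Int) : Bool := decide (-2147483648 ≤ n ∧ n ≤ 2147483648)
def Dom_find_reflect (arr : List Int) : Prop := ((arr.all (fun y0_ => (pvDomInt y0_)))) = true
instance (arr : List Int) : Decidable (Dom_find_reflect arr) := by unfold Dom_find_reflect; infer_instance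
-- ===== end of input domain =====

-- B replaces A's sentinel-prev scan + hand-rolled inner while with a precomputed reversed list and
-- a bulk slice comparison per neighbor-equal axis (alternative algorithm, same asymptotic cost);
-- B intentionally drops A's `prev = -1` sentinel artefact (see D_ below).

-- ===== PORT A =====
-- inner while loop of A; j starts at 1 and only grows, so it is carried as a Nat and the Python
-- guard `0 <= i - j` is rendered exactly as `j ≤ i`; fuel only makes the recursion structural
-- (with fuel ≥ arr.length + 1 the loop always exits via its own guard/break first).
def pvWhileA (arr : List Int) (i : Nat) : Nat → Nat → Nat
  | j, 0 => j
  | j, fuel + 1 =>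
    if j ≤ i ∧ i + j - 1 < arr.length then
      if arr.getD (i - j) 0 ≠ arr.getD (i + j - 1) 0 then j
      else pvWhileA arr i (j + 1) fuel
    else j

-- hand-port of Python's `enumerate` (exact: index paired with element, starting at k)
def pvEnumA (k : Nat) : List Int → List (Nat × Int)
  | [] => []
  | x :: xs => (k, x) :: pvEnumA (k + 1) xs

def pvLoopA (arr : List Int) (prev : Int) : List (Nat × Int) → Int
  | [] => -1
  | (i, x) :: rest =>
    if x = prev then
      let j := pvWhileA arr i 1 (arr.length + 1)
      -- Python `i - j < 0 or i + j - 1 == len(arr)`; `i - j < 0` is `i < j` over Nat (exact)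
      if i < j ∨ i + j - 1 = arr.length then (i : Int) + 1
      else pvLoopA arr x rest
    else pvLoopA arr x rest

def find_reflect (arr : List Int) : Int := pvLoopA arr (-1) (pvEnumA 0 arr)

-- ===== PORT B =====
-- Source B: rev = arr[::-1] once; for i in range(1, n): skip unless arr[i] == arr[i-1], else
-- compare rev[n-i : n-i+k] with arr[i : i+k], k = min(i, n-i); fuel is only a
-- structural-recursion device (fuel ≥ n - i, so the Python loop shape is reproduced exactly).
def pvLoopB (arr rev : List Int) : Nat → Nat → Int
  | _, 0 => -1
  | i, fuel + 1 =>
    if i < arr.length then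
      if arr.getD i 0 ≠ arr.getD (i - 1) 0 then pvLoopB arr rev (i + 1) fuel
      else
        let k := min i (arr.length - i)
        -- Python slices rev[n-i : n-i+k] and arr[i : i+k]; both are in range here (exact)
        if (rev.drop (arr.length - i)).take k = (arr.drop i).take k then (i : Int) + 1
        else pvLoopB arr rev (i + 1) fuel
    else -1

def find_reflect_alt (arr : List Int) : Int := pvLoopB arr arr.reverse 1 arr.length

-- ===== PRECONDITION & SPEC =====
-- On inputs whose FIRST element is -1, A's `prev = -1` sentinel fires at i = 0 and A returns 1
-- (a reflection axis before the first row, meaningless for the task); B returns the first real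
-- reflection axis or -1, which is the intended value.
def D_find_reflect (arr : List Int) : Prop := arr.head? = some (-1)
instance (arr : List Int) : Decidable (D_find_reflect arr) := by unfold D_find_reflect; infer_instance

def Spec_find_reflect (arr : List Int) (out : Int) : Prop := ¬ D_find_reflect arr → out = find_reflect_alt arr
instance (arr : List Int) (out : Int) : Decidable (Spec_find_reflect arr out) := by unfold Spec_find_reflect; infer_instance

def pvDiffWitness_find_reflect : List Int := [-1]
def pvDiffWitnessOut_find_reflect : Int × Int := (1, -1)

-- ===== CLAIM (what is proved, stated in full; the proofs are below) =====
def Claim_unchanged_find_reflect : Prop := ∀ (arr : List Int), Dom_find_reflect arr → Spec_find_reflect arr (find_reflect arr)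
def Claim_changed_find_reflect : Prop := Dom_find_reflect (pvDiffWitness_find_reflect) ∧ D_find_reflect (pvDiffWitness_find_reflect) ∧ find_reflect (pvDiffWitness_find_reflect) = pvDiffWitnessOut_find_reflect.1 ∧ find_reflect_alt (pvDiffWitness_find_reflect) = pvDiffWitnessOut_find_reflect.2 ∧ pvDiffWitnessOut_find_reflect.1 ≠ pvDiffWitnessOut_find_reflect.2
def Claim_exact_find_reflect : Prop := ∀ (arr : List Int), Dom_find_reflect arr → D_find_reflect arr → find_reflect arr ≠ find_reflect_alt arr

-- ===== LEMMAS AND PROOFS =====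

-- mirror condition at axis i, entry t (as A's while loop reads it)
def pvM (arr : List Int) (i t : Nat) : Prop := arr.getD (i - t) 0 = arr.getD (i + t - 1) 0

-- A's inner while loop followed by A's return test decides 'all entries up to the edge match'
lemma pvWhileA_cond_aux (arr : List Int) (i : Nat) (hi : 1 ≤ i) (hn : i < arr.length) :
    ∀ (fuel j : Nat), 1 ≤ j → j ≤ min i (arr.length - i) + 1 →
      min i (arr.length - i) + 1 - j ≤ fuel →
      (∀ t, 1 ≤ t → t < j → pvM arr i t) →
      ((i < pvWhileA arr i j fuel ∨ i + pvWhileA arr i j fuel - 1 = arr.length) ↔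
        ∀ t, 1 ≤ t → t ≤ min i (arr.length - i) → pvM arr i t) := by
  intro fuel
  induction fuel with
  | zero =>
    intro j h1 h2 hf hpre
    have hj : j = min i (arr.length - i) + 1 := by omega
    simp only [pvWhileA]
    constructor
    · intro _ t ht1 ht2; exact hpre t ht1 (by omega)
    · intro _; omega
  | succ fuel ih =>
    intro j h1 h2 hf hpre
    by_cases hK : j ≤ min i (arr.length - i)
    · have hg : j ≤ i ∧ i + j - 1 < arr.length := by omega
      by_cases hm : arr.getD (i - j) 0 ≠ arr.getD (i + j - 1) 0
      · simp only [pvWhileA, if_pos hg, if_pos hm]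
        constructor
        · intro h; omega
        · intro hall; exact absurd (hall j h1 hK) hm
      · simp only [pvWhileA, if_pos hg, if_neg hm]
        apply ih (j + 1) (by omega) (by omega) (by omega)
        intro t ht1 ht2
        by_cases htj : t = j
        · subst htj; exact not_not.mp hm
        · exact hpre t ht1 (by omega)
    · have hj : j = min i (arr.length - i) + 1 := by omega
      have hg : ¬ (j ≤ i ∧ i + j - 1 < arr.length) := by omega
      simp only [pvWhileA, if_neg hg]
      constructor
      · intro _ t ht1 ht2; exact hpre t ht1 (by omega)
      · intro _; omega

lemma pvWhileA_cond (arr : List Int) (i : Nat) (hi : 1 ≤ i) (hn : i < arr.length) :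
    ((i < pvWhileA arr i 1 (arr.length + 1) ∨ i + pvWhileA arr i 1 (arr.length + 1) - 1 = arr.length) ↔
      ∀ t, 1 ≤ t → t ≤ min i (arr.length - i) → pvM arr i t) := by
  apply pvWhileA_cond_aux arr i hi hn (arr.length + 1) 1 le_rfl (by omega) (by omega)
  intro t ht1 ht2; omega

-- B's slice comparison decides the same condition
lemma pvTakeEq_iff (arr : List Int) (i : Nat) (hi : 1 ≤ i) (hn : i < arr.length) :
    (((arr.take i).reverse.take (min ((arr.take i).reverse.length) ((arr.drop i).length)) =
      (arr.drop i).take (min ((arr.take i).reverse.length) ((arr.drop i).length))) ↔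
      ∀ t, 1 ≤ t → t ≤ min i (arr.length - i) → pvM arr i t) := by
  have hL : (arr.take i).reverse.length = i := by simp; omega
  have hR : (arr.drop i).length = arr.length - i := by simp
  rw [hL, hR]
  set K := min i (arr.length - i) with hK
  have hKi : K ≤ i := by omega
  have hKn : K ≤ arr.length - i := by omega
  rw [List.ext_getElem?_iff]
  constructor
  · intro h t ht1 ht2
    have hm := h (t - 1)
    rw [List.getElem?_take, List.getElem?_take, if_pos (by omega), if_pos (by omega)] at hm
    rw [List.getElem?_reverse (by simp; omega), List.getElem?_drop] at hm
    simp only [List.length_take] at hm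
    rw [List.getElem?_take, if_pos (by omega)] at hm
    have e1 : min i arr.length - 1 - (t - 1) = i - t := by omega
    have e2 : i + (t - 1) = i + t - 1 := by omega
    rw [e1, e2] at hm
    unfold pvM
    rw [List.getD_eq_getElem?_getD, List.getD_eq_getElem?_getD, hm]
  · intro hall m
    rw [List.getElem?_take, List.getElem?_take]
    by_cases hm : m < K
    · rw [if_pos hm, if_pos hm]
      rw [List.getElem?_reverse (by simp; omega), List.getElem?_drop]
      simp only [List.length_take]
      rw [List.getElem?_take, if_pos (by omega)]
      have h := hall (m + 1) (by omega) (by omega)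
      unfold pvM at h
      rw [List.getD_eq_getElem?_getD, List.getD_eq_getElem?_getD] at h
      have e1 : min i arr.length - 1 - m = i - (m + 1) := by omega
      have e2 : i + m = i + (m + 1) - 1 := by omega
      rw [e1, e2]
      have h1 : i - (m + 1) < arr.length := by omega
      have h2 : i + (m + 1) - 1 < arr.length := by omega
      rw [List.getElem?_eq_getElem h1, List.getElem?_eq_getElem h2]
      rw [List.getElem?_eq_getElem h1, List.getElem?_eq_getElem h2] at h
      simp only [Option.getD_some] at h
      rw [h]
    · rw [if_neg hm, if_neg hm]

-- B's slice comparison (over the precomputed reverse) decides the same condition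
lemma pvTakeEqRev_iff (arr : List Int) (i : Nat) (hi : 1 ≤ i) (hn : i < arr.length) :
    (((arr.reverse.drop (arr.length - i)).take (min i (arr.length - i)) =
      (arr.drop i).take (min i (arr.length - i))) ↔
      ∀ t, 1 ≤ t → t ≤ min i (arr.length - i) → pvM arr i t) := by
  have h := pvTakeEq_iff arr i hi hn
  rw [List.length_reverse, List.length_take, List.length_drop,
    Nat.min_eq_left hn.le] at h
  rw [List.drop_reverse]
  have he : arr.length - (arr.length - i) = i := by omega
  rw [he]
  exact h

-- the two loops agree from any start index k ≥ 1 with prev = arr[k-1]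
lemma pvLoop_eq (arr : List Int) : ∀ (xs : List Int) (k fuel : Nat), 1 ≤ k → xs = arr.drop k →
    arr.length - k ≤ fuel →
    pvLoopA arr (arr.getD (k - 1) 0) (pvEnumA k xs) = pvLoopB arr arr.reverse k fuel := by
  intro xs
  induction xs with
  | nil =>
    intro k fuel h1 hdrop hf
    have hk : arr.length ≤ k := by
      have := congrArg List.length hdrop; simp at this; omega
    cases fuel with
    | zero => simp [pvEnumA, pvLoopA, pvLoopB]
    | succ fuel => simp [pvEnumA, pvLoopA, pvLoopB, if_neg (by omega : ¬ k < arr.length)]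
  | cons x xs ih =>
    intro k fuel h1 hdrop hf
    have hlen : xs.length + 1 = arr.length - k := by
      have := congrArg List.length hdrop; simp at this; omega
    have hk : k < arr.length := by omega
    have hx : arr.getD k 0 = x := by
      have h0 : (arr.drop k)[0]? = some x := by rw [← hdrop]; rfl
      rw [List.getElem?_drop, Nat.add_zero] at h0
      rw [List.getD_eq_getElem?_getD, h0]
      rfl
    have hxs : xs = arr.drop (k + 1) := by
      rw [← List.tail_drop, ← hdrop]; rfl
    cases fuel with
    | zero => omega
    | succ fuel =>
      have hstep : pvLoopA arr x (pvEnumA (k + 1) xs) = pvLoopB arr arr.reverse (k + 1) fuel := by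
        have h := ih (k + 1) fuel (by omega) hxs (by omega)
        simp only [Nat.add_sub_cancel] at h
        rw [hx] at h
        exact h
      simp only [pvEnumA, pvLoopA, pvLoopB, if_pos hk]
      by_cases hp : x = arr.getD (k - 1) 0
      · have hg : ¬ (arr.getD k 0 ≠ arr.getD (k - 1) 0) := by
          rw [hx]; exact not_not_intro hp
        rw [if_pos hp, if_neg hg]
        by_cases hB : ((arr.reverse.drop (arr.length - k)).take (min k (arr.length - k)) =
            (arr.drop k).take (min k (arr.length - k)))
        · have hall := (pvTakeEqRev_iff arr k h1 hk).mp hB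
          have hA := (pvWhileA_cond arr k h1 hk).mpr hall
          rw [if_pos hA, if_pos hB]
        · have hnA : ¬ (k < pvWhileA arr k 1 (arr.length + 1) ∨
              k + pvWhileA arr k 1 (arr.length + 1) - 1 = arr.length) := by
            intro h
            exact hB ((pvTakeEqRev_iff arr k h1 hk).mpr ((pvWhileA_cond arr k h1 hk).mp h))
          rw [if_neg hnA, if_neg hB]
          exact hstep
      · have hg : arr.getD k 0 ≠ arr.getD (k - 1) 0 := by
          rw [hx]; exact hp
        rw [if_neg hp, if_pos hg]
        exact hstep

lemma pvLoopB_ne_one (arr rev : List Int) : ∀ (fuel i : Nat), 1 ≤ i → pvLoopB arr rev i fuel ≠ 1 := by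
  intro fuel
  induction fuel with
  | zero => intro i _; simp [pvLoopB]
  | succ fuel ih =>
    intro i hi
    simp only [pvLoopB]
    split_ifs with h1 h2 h3
    · exact ih (i + 1) (by omega)
    · intro hc
      have : ((i : Int)) + 1 = 1 := hc
      omega
    · exact ih (i + 1) (by omega)
    · decide

-- ===== VERDICT (by name: the statement is the Claim_ definition above) =====
theorem find_reflect_spec : Claim_unchanged_find_reflect := by
  intro arr _ hnD
  show find_reflect arr = find_reflect_alt arr
  cases arr with
  | nil => rfl
  | cons x xs =>
    have hx : ¬ x = (-1 : Int) := by
      intro h; exact hnD (by simp [D_find_reflect, h])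
    unfold find_reflect find_reflect_alt
    simp only [pvEnumA, pvLoopA]
    rw [if_neg hx]
    have h := pvLoop_eq (x :: xs) xs 1 (x :: xs).length le_rfl rfl (by simp)
    simpa using h

theorem find_reflect_changed : Claim_changed_find_reflect := by
  unfold Claim_changed_find_reflect; decide

theorem find_reflect_tight : Claim_exact_find_reflect := by
  intro arr _ hD
  cases arr with
  | nil => simp [D_find_reflect] at hD
  | cons x xs =>
    simp only [D_find_reflect, List.head?_cons, Option.some.injEq] at hD
    subst hD
    have hA : find_reflect ((-1) :: xs) = 1 := by
      unfold find_reflect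
      simp [pvEnumA, pvLoopA, pvWhileA]
    rw [hA]
    intro h
    exact pvLoopB_ne_one ((-1) :: xs) ((-1) :: xs).reverse ((-1) :: xs).length 1 le_rfl h.symm
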